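-- pv_equiv track=rewrite | github.com/benji-lewis/Minecraft-Plugins | kim-jong-un-2/scripts/generate_textures.py | vertical_stripe
-- ===== SOURCE A (Python) =====
-- def vertical_stripe(width: int, height: int, color_a: tuple[int, int, int], color_b: tuple[int, int, int]) -> list[list[tuple[int, int, int]]]:
--     pixels = []
--     for y in range(height):
--         row = []
--         for x in range(width):
--             row.append(color_a if x % 2 == 0 else color_b)
--         pixels.append(row)
--     return pixels
-- ===== SOURCE B (Python) =====
-- def vertical_stripe(width: int, height: int, color_a: tuple[int, int, int], color_b: tuple[int, int, int]) -> list[list[tuple[int, int, int]]]: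
--     # Column-major fill: start with empty rows, then extend every row by one
--     # pixel per column, computing each column's color once.
--     if height <= 0:
--         return []
--     rows = [[] for _ in range(height)]
--     for x in range(width):
--         c = color_a if x % 2 == 0 else color_b
--         for r in rows:
--             r.append(c)
--     return rows
-- ===== Notes on version B (the rewrite author's own statement) =====
-- stated objective: alternative
-- what changed: Fills the grid column-by-column (outer loop over x, appending that column's color, computed once, to every row) instead of A's row-major nested per-pixel loop.
import Mathlib
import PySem

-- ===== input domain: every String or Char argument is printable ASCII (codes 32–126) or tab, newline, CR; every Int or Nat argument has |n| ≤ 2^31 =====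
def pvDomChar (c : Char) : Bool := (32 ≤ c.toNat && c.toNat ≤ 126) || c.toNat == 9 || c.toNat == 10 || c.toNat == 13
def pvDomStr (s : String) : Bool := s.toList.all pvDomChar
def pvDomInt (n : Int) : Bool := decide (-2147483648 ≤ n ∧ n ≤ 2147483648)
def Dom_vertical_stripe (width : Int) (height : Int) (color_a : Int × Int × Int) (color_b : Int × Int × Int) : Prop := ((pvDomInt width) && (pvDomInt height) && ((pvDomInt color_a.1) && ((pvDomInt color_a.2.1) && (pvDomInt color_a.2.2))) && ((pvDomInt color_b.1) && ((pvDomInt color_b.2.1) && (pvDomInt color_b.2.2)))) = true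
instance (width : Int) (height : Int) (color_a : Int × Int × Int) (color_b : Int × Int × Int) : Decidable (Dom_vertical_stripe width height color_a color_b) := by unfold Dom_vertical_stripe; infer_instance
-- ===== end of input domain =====

-- ===== PORT A =====
-- B fills the grid column-by-column (outer loop over x) instead of A's row-major nested loop (alternative decomposition).
def vertical_stripe (width : Int) (height : Int) (color_a : Int × Int × Int) (color_b : Int × Int × Int) : List (List (Int × Int × Int)) :=
  (PySem.List.pyRange 0 height 1).foldl (fun pixels _y =>
    pixels ++ [(PySem.List.pyRange 0 width 1).foldl (fun row x =>
      row ++ [if x % 2 == 0 then color_a else color_b]) []]) []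

-- ===== PORT B =====
def vertical_stripe_alt (width : Int) (height : Int) (color_a : Int × Int × Int) (color_b : Int × Int × Int) : List (List (Int × Int × Int)) :=
  if height ≤ 0 then []
  else (PySem.List.pyRange 0 width 1).foldl (fun rows x =>
      let c := if x % 2 == 0 then color_a else color_b
      rows.map (fun r => r ++ [c]))
    ((PySem.List.pyRange 0 height 1).map (fun _ => ([] : List (Int × Int × Int))))

-- ===== PRECONDITION & SPEC =====
def Spec_vertical_stripe (width : Int) (height : Int) (color_a : Int × Int × Int) (color_b : Int × Int × Int) (out : List (List (Int × Int × Int))) : Prop := out = vertical_stripe_alt width height color_a color_b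
instance (width : Int) (height : Int) (color_a : Int × Int × Int) (color_b : Int × Int × Int) (out : List (List (Int × Int × Int))) : Decidable (Spec_vertical_stripe width height color_a color_b out) := by unfold Spec_vertical_stripe; infer_instance

-- ===== CLAIM (what is proved, stated in full; the proofs are below) =====
def Claim_equal_vertical_stripe : Prop := ∀ (width : Int) (height : Int) (color_a : Int × Int × Int) (color_b : Int × Int × Int), Dom_vertical_stripe width height color_a color_b → Spec_vertical_stripe width height color_a color_b (vertical_stripe width height color_a color_b)

-- ===== LEMMAS AND PROOFS =====

-- ===== VERDICT (by name: the statement is the Claim_ definition above) =====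
theorem foldl_app_map {α β : Type} (f : α → β) (l : List α) (acc : List β) :
    l.foldl (fun r x => r ++ [f x]) acc = acc ++ l.map f := by
  induction l generalizing acc with
  | nil => simp
  | cons a t ih => simp [List.foldl, ih]

theorem foldl_colmajor {α β : Type} (f : α → β) (xs : List α) (L : List (List β)) :
    xs.foldl (fun rows x => rows.map (fun r => r ++ [f x])) L
      = L.map (fun r => r ++ xs.map f) := by
  induction xs generalizing L with
  | nil => simp
  | cons a t ih => simp [List.foldl, ih, List.map_map, Function.comp]

theorem vertical_stripe_spec : Claim_equal_vertical_stripe := by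
  intro width height ca cb _
  unfold Spec_vertical_stripe vertical_stripe vertical_stripe_alt
  by_cases h : height ≤ 0
  · have hr : PySem.List.pyRange 0 height 1 = [] := by
      rw [PySem.List.pyRange_one]; simp; omega
    simp [h, hr]
  · simp only [h, if_neg, foldl_app_map, foldl_colmajor, List.nil_append, List.map_map,
      if_false]
    exact List.map_congr_left (fun _ _ => rfl)
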